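-- pv_equiv track=rewrite | github.com/Jkweks/labelgen | backend/labelgen/pdf.py | _group_blocks_by_row
-- ===== SOURCE A (Python) =====
-- from typing import Any, Iterable, Optional
--
-- def _group_blocks_by_row(blocks: list[dict[str, Any]]) -> list[list[dict[str, Any]]]:
--     rows: list[list[dict[str, Any]]] = []
--     current: list[dict[str, Any]] = []
--     for block in blocks:
--         width = block.get("width")
--         normalized_width = "half" if width == "half" else "full"
--         candidate = {"key": block.get("key"), "width": normalized_width}
--         if normalized_width == "full":
--             if current:
--                 rows.append(current)
--                 current = []
--             rows.append([candidate])
--         else: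
--             current.append(candidate)
--             if len(current) == 2:
--                 rows.append(current)
--                 current = []
--     if current:
--         rows.append(current)
--     return rows
-- ===== SOURCE B (Python) =====
-- from typing import Any
--
--
-- def _candidate(block: dict[str, Any]) -> dict[str, Any]:
--     return {"key": block.get("key"),
--             "width": "half" if block.get("width") == "half" else "full"}
--
--
-- def _group_blocks_by_row(blocks: list[dict[str, Any]]) -> list[list[dict[str, Any]]]:
--     # Direct recursion with one-block lookahead: a full block is its own row;
--     # two consecutive halves form a pair row; a lone half gets its own row.
--     def go(i: int) -> list[list[dict[str, Any]]]:
--         if i >= len(blocks):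
--             return []
--         c = _candidate(blocks[i])
--         if c["width"] == "full":
--             return [[c]] + go(i + 1)
--         if i + 1 < len(blocks) and _candidate(blocks[i + 1])["width"] == "half":
--             return [[c, _candidate(blocks[i + 1])]] + go(i + 2)
--         return [[c]] + go(i + 1)
--     return go(0)
-- ===== Notes on version B (the rewrite author's own statement) =====
-- stated objective: alternative
-- what changed: B replaces A's stateful single pass with a 2-slot buffer by a stateless recursion with one-block lookahead: a full block becomes its own row, two consecutive halves become a pair row (skip 2), a lone half becomes its own row.
import Mathlib
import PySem

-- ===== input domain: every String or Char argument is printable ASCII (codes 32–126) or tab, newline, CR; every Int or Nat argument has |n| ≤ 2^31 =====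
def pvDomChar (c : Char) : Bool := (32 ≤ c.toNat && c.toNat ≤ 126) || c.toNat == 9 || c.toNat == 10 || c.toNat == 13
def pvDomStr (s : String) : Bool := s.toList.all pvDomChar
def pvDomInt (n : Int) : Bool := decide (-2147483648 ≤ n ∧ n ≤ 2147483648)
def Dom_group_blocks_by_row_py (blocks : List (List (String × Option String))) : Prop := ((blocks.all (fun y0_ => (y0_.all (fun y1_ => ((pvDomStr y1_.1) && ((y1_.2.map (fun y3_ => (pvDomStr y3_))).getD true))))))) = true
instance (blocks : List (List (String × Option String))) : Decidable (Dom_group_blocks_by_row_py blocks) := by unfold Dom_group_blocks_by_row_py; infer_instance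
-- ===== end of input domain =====

-- B replaces A's stateful pass with a 2-slot buffer by a stateless recursion with
-- one-block lookahead (full → own row; two consecutive halves → pair row; lone half → own row).

-- ===== PORT A =====
-- the loop body of A: state = (rows, current)
def pvStepA (st : List (List (List (String × Option String))) × List (List (String × Option String)))
    (block : List (String × Option String)) :
    List (List (List (String × Option String))) × List (List (String × Option String)) :=
  let rows := st.1
  let current := st.2
  let width := (PySem.Dict.mk block).get? "width"
  let normalized_width := if width = some (some "half") then "half" else "full"
  let candidate : List (String × Option String) :=
    [("key", ((PySem.Dict.mk block).get? "key").getD none), ("width", some normalized_width)]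
  if normalized_width = "full" then
    let rows := if current.isEmpty then rows else rows ++ [current]
    (rows ++ [[candidate]], [])
  else
    let current := current ++ [candidate]
    if current.length = 2 then (rows ++ [current], []) else (rows, current)

def group_blocks_by_row_py (blocks : List (List (String × Option String))) : List (List (List (String × Option String))) :=
  let st := blocks.foldl pvStepA ([], [])
  if st.2.isEmpty then st.1 else st.1 ++ [st.2]

-- ===== PORT B =====
-- _candidate of Source B
def pvCandB (block : List (String × Option String)) : List (String × Option String) :=
  [("key", ((PySem.Dict.mk block).get? "key").getD none),
   ("width", some (if (PySem.Dict.mk block).get? "width" = some (some "half") then "half" else "full"))]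

-- go of Source B: recursion over the remaining blocks with one-block lookahead
def pvGoB : List (List (String × Option String)) → List (List (List (String × Option String)))
  | [] => []
  | b :: rest =>
    let c := pvCandB b
    if ¬ (PySem.Dict.mk b).get? "width" = some (some "half") then
      [c] :: pvGoB rest
    else
      match rest with
      | b2 :: rest' =>
        if (PySem.Dict.mk b2).get? "width" = some (some "half") then
          [c, pvCandB b2] :: pvGoB rest'
        else
          [c] :: pvGoB (b2 :: rest')
      | [] => [[c]]
termination_by l => l.length
decreasing_by all_goals simp

def group_blocks_by_row_py_alt (blocks : List (List (String × Option String))) : List (List (List (String × Option String))) :=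
  pvGoB blocks

-- ===== PRECONDITION & SPEC =====
def Spec_group_blocks_by_row_py (blocks : List (List (String × Option String))) (out : List (List (List (String × Option String)))) : Prop := out = group_blocks_by_row_py_alt blocks
instance (blocks : List (List (String × Option String))) (out : List (List (List (String × Option String)))) : Decidable (Spec_group_blocks_by_row_py blocks out) := by unfold Spec_group_blocks_by_row_py; infer_instance

-- ===== CLAIM (what is proved, stated in full; the proofs are below) =====
def Claim_equal_group_blocks_by_row_py : Prop := ∀ (blocks : List (List (String × Option String))), Dom_group_blocks_by_row_py blocks → Spec_group_blocks_by_row_py blocks (group_blocks_by_row_py blocks)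

-- ===== LEMMAS AND PROOFS =====

theorem pvGoB_nil : pvGoB [] = [] := by rw [pvGoB]

-- final flush of A's loop state
def pvFinish (st : List (List (List (String × Option String))) × List (List (String × Option String))) :
    List (List (List (String × Option String))) :=
  if st.2.isEmpty then st.1 else st.1 ++ [st.2]

-- what B produces from the blocks after a pending half candidate c
def pvPend (c : List (String × Option String)) :
    List (List (String × Option String)) → List (List (List (String × Option String)))
  | [] => [[c]]
  | b :: rest =>
    if (PySem.Dict.mk b).get? "width" = some (some "half") then
      [c, pvCandB b] :: pvGoB rest
    else
      [c] :: pvGoB (b :: rest)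

theorem pvGoB_half (b : List (String × Option String)) (rest : List (List (String × Option String)))
    (h : (PySem.Dict.mk b).get? "width" = some (some "half")) :
    pvGoB (b :: rest) = pvPend (pvCandB b) rest := by
  cases rest with
  | nil => simp [pvGoB, pvPend, h]
  | cons b2 rest' =>
    by_cases h2 : (PySem.Dict.mk b2).get? "width" = some (some "half") <;>
      simp [pvGoB, pvPend, h, h2]

theorem pvGoB_full (b : List (String × Option String)) (rest : List (List (String × Option String)))
    (h : ¬ (PySem.Dict.mk b).get? "width" = some (some "half")) :
    pvGoB (b :: rest) = [pvCandB b] :: pvGoB rest := by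
  rw [pvGoB.eq_def]
  simp [h]

-- main invariant: A's fold from (rows, []) resp. (rows, [c]) produces rows ++ pvGoB / rows ++ pvPend c
theorem pvMain (blocks : List (List (String × Option String))) :
    ∀ rows : List (List (List (String × Option String))),
      pvFinish (blocks.foldl pvStepA (rows, [])) = rows ++ pvGoB blocks ∧
      ∀ c : List (String × Option String),
        pvFinish (blocks.foldl pvStepA (rows, [c])) = rows ++ pvPend c blocks := by
  induction blocks with
  | nil =>
    intro rows
    constructor
    · simp [pvFinish, pvGoB_nil]
    · intro c; simp [pvFinish, pvPend]
  | cons b rest ih =>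
    intro rows
    by_cases h : (PySem.Dict.mk b).get? "width" = some (some "half")
    · have hc : pvStepA (rows, []) b = (rows, [pvCandB b]) := by
        simp [pvStepA, pvCandB, h]
      constructor
      · rw [List.foldl_cons, hc, (ih rows).2 (pvCandB b), pvGoB_half b rest h]
      · intro c
        have hc2 : pvStepA (rows, [c]) b = (rows ++ [[c, pvCandB b]], []) := by
          simp [pvStepA, pvCandB, h]
        rw [List.foldl_cons, hc2, (ih (rows ++ [[c, pvCandB b]])).1]
        simp [pvPend, h]
    · have hc : pvStepA (rows, []) b = (rows ++ [[pvCandB b]], []) := by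
        simp [pvStepA, pvCandB, h]
      constructor
      · rw [List.foldl_cons, hc, (ih (rows ++ [[pvCandB b]])).1, pvGoB_full b rest h]
        simp
      · intro c
        have hc2 : pvStepA (rows, [c]) b = (rows ++ [[c]] ++ [[pvCandB b]], []) := by
          simp [pvStepA, pvCandB, h]
        rw [List.foldl_cons, hc2, (ih (rows ++ [[c]] ++ [[pvCandB b]])).1]
        simp [pvPend, h, pvGoB_full b rest h]

-- ===== VERDICT (by name: the statement is the Claim_ definition above) =====
theorem group_blocks_by_row_py_spec : Claim_equal_group_blocks_by_row_py := by
  intro blocks _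
  unfold Spec_group_blocks_by_row_py group_blocks_by_row_py group_blocks_by_row_py_alt
  simpa [pvFinish] using (pvMain blocks []).1
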